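-- pv_equiv track=rewrite | github.com/szaheer003/tms-vendor-dashboard | scripts/validate_all.py | find_cs_live_row
-- ===== SOURCE A (Python) =====
-- from typing import Any, Optional
--
-- def find_cs_live_row(rate_card: list[dict]) -> Optional[dict]:
--     for r in rate_card:
--         lab = (r.get("label") or "").lower()
--         if "live agent" in lab and "canonical" in lab:
--             return r
--         if "live agent" in lab:
--             return r
--     for r in rate_card:
--         if "multilingual" in (r.get("label") or "").lower() and "canonical" in (r.get("label") or "").lower():
--             return r
--     return rate_card[0] if rate_card else None
-- ===== SOURCE B (Python) =====
-- from typing import Any, Optional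
--
-- def find_cs_live_row(rate_card: list[dict]) -> Optional[dict]:
--     fallback = None
--     for r in rate_card:
--         lab = (r.get("label") or "").lower()
--         if "live agent" in lab:
--             return r
--         if fallback is None and "multilingual" in lab and "canonical" in lab:
--             fallback = r
--     if fallback is not None:
--         return fallback
--     return rate_card[0] if rate_card else None
-- ===== Notes on version B (the rewrite author's own statement) =====
-- stated objective: alternative
-- what changed: Replaces A's two separate scans of rate_card with a single pass that returns a 'live agent' row immediately and remembers the first 'multilingual'+'canonical' row as a fallback candidate.
import Mathlib
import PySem

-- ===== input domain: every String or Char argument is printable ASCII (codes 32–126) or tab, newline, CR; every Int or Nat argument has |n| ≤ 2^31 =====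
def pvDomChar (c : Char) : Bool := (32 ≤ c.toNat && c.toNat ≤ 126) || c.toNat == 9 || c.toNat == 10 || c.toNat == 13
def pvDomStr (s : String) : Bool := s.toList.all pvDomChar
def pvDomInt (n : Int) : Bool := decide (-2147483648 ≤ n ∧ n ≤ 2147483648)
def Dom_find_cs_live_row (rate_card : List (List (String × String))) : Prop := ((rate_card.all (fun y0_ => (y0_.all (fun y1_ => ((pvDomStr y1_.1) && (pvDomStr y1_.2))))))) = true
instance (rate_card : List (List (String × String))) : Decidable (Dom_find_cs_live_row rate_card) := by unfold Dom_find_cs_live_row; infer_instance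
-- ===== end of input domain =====

-- B replaces A's two scans of rate_card with one pass keeping a fallback candidate (alternative decomposition, same cost).
-- ===== PORT A =====
-- lab = (r.get("label") or "").lower()
def pvLab (r : List (String × String)) : String :=
  PySem.Str.lower (((PySem.Dict.mk r).get? "label").getD "")

-- first loop of A: return r on "live agent" ∧ "canonical", or on "live agent"
def pvALoop1 : List (List (String × String)) → Option (List (String × String))
  | [] => none
  | r :: rest =>
    let lab := pvLab r
    if PySem.Str.isIn "live agent" lab && PySem.Str.isIn "canonical" lab then some r
    else if PySem.Str.isIn "live agent" lab then some r
    else pvALoop1 rest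

-- second loop of A: return r on "multilingual" ∧ "canonical" (label lowered twice, as in the source)
def pvALoop2 : List (List (String × String)) → Option (List (String × String))
  | [] => none
  | r :: rest =>
    if PySem.Str.isIn "multilingual" (pvLab r) && PySem.Str.isIn "canonical" (pvLab r) then some r
    else pvALoop2 rest

def find_cs_live_row (rate_card : List (List (String × String))) : Option (List (String × String)) :=
  match pvALoop1 rate_card with
  | some r => some r
  | none =>
    match pvALoop2 rate_card with
    | some r => some r
    | none => match rate_card with
      | [] => none
      | r :: _ => some r

-- ===== PORT B =====
-- single pass with a fallback accumulator (Source B)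
def pvBLoop : List (List (String × String)) → Option (List (String × String)) → Option (List (String × String))
  | [], fallback => fallback
  | r :: rest, fallback =>
    let lab := pvLab r
    if PySem.Str.isIn "live agent" lab then some r
    else pvBLoop rest
      (if fallback.isNone && PySem.Str.isIn "multilingual" lab && PySem.Str.isIn "canonical" lab
       then some r else fallback)

def find_cs_live_row_alt (rate_card : List (List (String × String))) : Option (List (String × String)) :=
  match pvBLoop rate_card none with
  | some r => some r
  | none => match rate_card with
    | [] => none
    | r :: _ => some r

-- ===== PRECONDITION & SPEC =====
def Spec_find_cs_live_row (rate_card : List (List (String × String))) (out : Option (List (String × String))) : Prop := out = find_cs_live_row_alt rate_card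
instance (rate_card : List (List (String × String))) (out : Option (List (String × String))) : Decidable (Spec_find_cs_live_row rate_card out) := by unfold Spec_find_cs_live_row; infer_instance

-- ===== CLAIM (what is proved, stated in full; the proofs are below) =====
def Claim_equal_find_cs_live_row : Prop := ∀ (rate_card : List (List (String × String))), Dom_find_cs_live_row rate_card → Spec_find_cs_live_row rate_card (find_cs_live_row rate_card)

-- ===== LEMMAS AND PROOFS =====

-- B's loop equals: A's first scan, or else the fallback, or else A's second scan.
theorem pvBLoop_eq (rc : List (List (String × String)))
    (fb : Option (List (String × String))) :
    pvBLoop rc fb =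
      match pvALoop1 rc with
      | some r => some r
      | none => fb.or (pvALoop2 rc) := by
  induction rc generalizing fb with
  | nil => cases fb <;> simp [pvBLoop, pvALoop1, pvALoop2]
  | cons r rest ih =>
    by_cases hL : PySem.Str.isIn "live agent" (pvLab r) = true
    · simp [pvBLoop, pvALoop1, hL, -PySem.Str.isIn_eq]
    · by_cases hMC : (PySem.Str.isIn "multilingual" (pvLab r)
          && PySem.Str.isIn "canonical" (pvLab r)) = true
      · cases fb <;>
          simp [pvBLoop, pvALoop1, pvALoop2, hL, hMC, ih, -PySem.Str.isIn_eq]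
      · cases fb <;>
          simp [pvBLoop, pvALoop1, pvALoop2, hL, hMC, ih, -PySem.Str.isIn_eq]

-- ===== VERDICT (by name: the statement is the Claim_ definition above) =====
theorem find_cs_live_row_spec : Claim_equal_find_cs_live_row := by
  intro rc _
  unfold Spec_find_cs_live_row find_cs_live_row find_cs_live_row_alt
  rw [pvBLoop_eq]
  cases h1 : pvALoop1 rc <;> cases h2 : pvALoop2 rc <;> simp
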